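-- pv_equiv track=rewrite | github.com/anonymokata/422bd8fa-1ad6-11ea-b2b8-22f772e7e8f0 | src/Pencil.py | textDurabilityCost
-- ===== SOURCE A (Python) =====
-- def textDurabilityCost(text):
--     durabilityCost = 0
--     for char in text:
--         if len(char.strip()) == 0:
--             pass
--         elif char.islower():
--             durabilityCost += 1
--         else:
--             durabilityCost += 2
--     return durabilityCost
-- ===== SOURCE B (Python) =====
-- def textDurabilityCost(text):
--     non_ws = sum(1 for c in text if not c.isspace())
--     lower = sum(1 for c in text if c.islower())
--     return 2 * non_ws - lower
-- ===== Notes on version B (the rewrite author's own statement) =====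
-- stated objective: alternative
-- what changed: Replaces the per-character three-way branch with two category counts (non-whitespace and lowercase) combined by the closed form 2*nonws - lower.
import Mathlib
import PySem

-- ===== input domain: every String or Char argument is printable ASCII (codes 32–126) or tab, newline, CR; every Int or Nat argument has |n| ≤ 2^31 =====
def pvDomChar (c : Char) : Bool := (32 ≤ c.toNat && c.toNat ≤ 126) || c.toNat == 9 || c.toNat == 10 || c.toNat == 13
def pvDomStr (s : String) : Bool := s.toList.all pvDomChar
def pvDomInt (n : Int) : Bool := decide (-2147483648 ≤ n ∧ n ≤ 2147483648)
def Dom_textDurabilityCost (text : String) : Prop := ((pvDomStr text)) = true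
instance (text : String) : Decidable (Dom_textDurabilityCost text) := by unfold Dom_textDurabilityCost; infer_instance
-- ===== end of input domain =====

-- B replaces A's per-character three-way branch by two category counts combined as 2*nonws - lower (alternative decomposition, same cost).


-- ===== PORT A =====
-- literal port: fold over the characters, three-way branch per character
def textDurabilityCost (text : String) : Int :=
  text.toList.foldl
    (fun durabilityCost char =>
      if (PySem.Chars.strip [char]).length = 0 then durabilityCost
      else if PySem.Chars.islower char then durabilityCost + 1
      else durabilityCost + 2)
    0

-- ===== PORT B =====
-- port of Source B: two counts, then the closed-form combination
def textDurabilityCost_alt (text : String) : Int :=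
  let nonWs : Int := text.toList.countP (fun c => !PySem.Chars.isspace c)
  let lower : Int := text.toList.countP PySem.Chars.islower
  2 * nonWs - lower

-- ===== PRECONDITION & SPEC =====
def Spec_textDurabilityCost (text : String) (out : Int) : Prop := out = textDurabilityCost_alt text
instance (text : String) (out : Int) : Decidable (Spec_textDurabilityCost text out) := by unfold Spec_textDurabilityCost; infer_instance

-- ===== CLAIM (what is proved, stated in full; the proofs are below) =====
def Claim_equal_textDurabilityCost : Prop := ∀ (text : String), Dom_textDurabilityCost text → Spec_textDurabilityCost text (textDurabilityCost text)

-- ===== LEMMAS AND PROOFS =====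

-- stripping a one-character string: empty exactly when the character is whitespace
lemma strip_singleton (c : Char) :
    PySem.Chars.strip [c] = if PySem.Chars.isspace c then [] else [c] := by
  simp only [PySem.Chars.strip, PySem.Chars.lstrip, PySem.Chars.rstrip, List.dropWhile]
  by_cases h : PySem.Chars.isspace c = true <;> simp [h]

-- a lowercase letter is never whitespace
lemma islower_not_isspace (c : Char) (h : PySem.Chars.islower c = true) :
    PySem.Chars.isspace c = false := by
  simp only [PySem.Chars.islower, Bool.and_eq_true, decide_eq_true_eq, Char.le_def] at h
  simp only [PySem.Chars.isspace, Char.toNat]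
  simp only [Bool.or_eq_false_iff, Bool.and_eq_false_iff, decide_eq_false_iff_not]
  have h1 : ('a').val ≤ c.val := h.1
  have h2 : c.val ≤ ('z').val := h.2
  rw [UInt32.le_iff_toNat_le] at h1 h2
  simp only [show ('a').val.toNat = 97 from rfl, show ('z').val.toNat = 122 from rfl] at h1 h2
  omega

-- loop invariant for A's fold
lemma foldl_cost (l : List Char) (acc : Int) :
    l.foldl
      (fun durabilityCost char =>
        if (PySem.Chars.strip [char]).length = 0 then durabilityCost
        else if PySem.Chars.islower char then durabilityCost + 1
        else durabilityCost + 2)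
      acc
    = acc + 2 * (l.countP (fun c => !PySem.Chars.isspace c) : Int)
        - (l.countP PySem.Chars.islower : Int) := by
  induction l generalizing acc with
  | nil => simp
  | cons c t ih =>
    simp only [List.foldl_cons, List.countP_cons]
    by_cases hs : PySem.Chars.isspace c = true
    · have hl : PySem.Chars.islower c = false := by
        by_cases h : PySem.Chars.islower c = true
        · exact absurd (islower_not_isspace c h) (by simp [hs])
        · simpa using h
      have hstep : (if (PySem.Chars.strip [c]).length = 0 then acc
          else if PySem.Chars.islower c = true then acc + 1 else acc + 2) = acc := by
        simp [strip_singleton, hs]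
      rw [hstep, ih]
      simp [hs, hl]
    · have hs' : PySem.Chars.isspace c = false := by simpa using hs
      by_cases hl : PySem.Chars.islower c = true
      · have hstep : (if (PySem.Chars.strip [c]).length = 0 then acc
            else if PySem.Chars.islower c = true then acc + 1 else acc + 2) = acc + 1 := by
          simp [strip_singleton, hs', hl]
        rw [hstep, ih]
        simp [hs', hl]
        ring
      · have hl' : PySem.Chars.islower c = false := by simpa using hl
        have hstep : (if (PySem.Chars.strip [c]).length = 0 then acc
            else if PySem.Chars.islower c = true then acc + 1 else acc + 2) = acc + 2 := by
          simp [strip_singleton, hs', hl']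
        rw [hstep, ih]
        simp [hs', hl']
        ring

-- ===== VERDICT (by name: the statement is the Claim_ definition above) =====
theorem textDurabilityCost_spec : Claim_equal_textDurabilityCost := by
  intro text _
  unfold Spec_textDurabilityCost
  simp only [textDurabilityCost, textDurabilityCost_alt, foldl_cost]
  ring
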